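-- pv_equiv track=rewrite | github.com/siadyhr/adventofcode | 2020/18/18.py | get_inner
-- ===== SOURCE A (Python) =====
-- def get_inner(expression):
--     starts = []
--     ends = []
--     for char in expression:
--         starts.append(char.count("("))
--         ends.append(char.count(")"))
--     if sum(ends) == 0:
--         return
--
--     first_end = min([i for i, val in enumerate(ends) if val > 0])
--     matching_start = max([i for i, val in enumerate(starts) if val > 0 and i <= first_end ])
--
--     return {
--         "start"   : matching_start,
--         "end"     : first_end,
--         "n_start" : starts[matching_start],
--         "n_end"   : ends[first_end],
--     }
-- ===== SOURCE B (Python) =====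
-- def get_inner(expression):
--     first_end = None
--     for i, tok in enumerate(expression):
--         if tok.count(")"):
--             first_end = i
--             break
--     if first_end is None:
--         return None
--     j = first_end
--     while j >= 0:
--         tok = expression[j]
--         if tok.count("("):
--             return {
--                 "start": j,
--                 "end": first_end,
--                 "n_start": tok.count("("),
--                 "n_end": expression[first_end].count(")"),
--             }
--         j -= 1
--     raise ValueError("no '(' at or before first ')'")
-- ===== Notes on version B (the rewrite author's own statement) =====
-- stated objective: faster
-- what changed: B replaces A's build-two-count-lists + comprehension-with-min/max pass with two direct searches: a forward scan that stops at the first token containing ')' and a backward scan from there for the nearest token containing '(', computing counts only for the two tokens returned.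
import Mathlib
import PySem

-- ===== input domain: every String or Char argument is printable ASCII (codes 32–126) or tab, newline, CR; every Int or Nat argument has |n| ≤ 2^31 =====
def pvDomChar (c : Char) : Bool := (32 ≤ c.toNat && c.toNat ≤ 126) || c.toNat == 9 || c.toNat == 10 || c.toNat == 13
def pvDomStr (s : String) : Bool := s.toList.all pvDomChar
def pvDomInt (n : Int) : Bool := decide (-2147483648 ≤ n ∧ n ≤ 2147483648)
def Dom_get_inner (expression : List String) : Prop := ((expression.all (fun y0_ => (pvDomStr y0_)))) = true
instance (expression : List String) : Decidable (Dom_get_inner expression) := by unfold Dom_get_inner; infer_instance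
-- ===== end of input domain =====

-- B: instead of building two count lists and taking min/max of index comprehensions, scan
-- forward to the first token containing ')' and backward from there for the nearest '(' token;
-- early exit and no intermediate lists (measured constant-factor speedup).

-- ===== PORT A =====
-- port of A: build the two count lists by the same append loop, then min/max of the
-- enumerate-filter index comprehensions (Python's min is guaranteed nonempty there; Python's
-- max raises ValueError on the empty comprehension — that input is excluded by Pre_ below,
-- the port returns none there)
def get_inner (expression : List String) : Option (List (String × Int)) :=
  let starts : List Int := expression.foldl (fun acc c => acc ++ [(PySem.Str.count c "(" : Int)]) []
  let ends : List Int := expression.foldl (fun acc c => acc ++ [(PySem.Str.count c ")" : Int)]) []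
  if ends.sum = 0 then none
  else
    match PySem.List.min? (((PySem.List.enumerate ends).filter (fun p => decide (0 < p.2))).map (·.1)) (fun i => i) with
    | none => none  -- unreachable: sum of ends ≠ 0
    | some first_end =>
      match PySem.List.max? (((PySem.List.enumerate starts).filter (fun p => decide (0 < p.2) && decide (p.1 ≤ first_end))).map (·.1)) (fun i => i) with
      | none => none  -- Python raises ValueError here; excluded by Pre_
      | some matching_start =>
        some [("start", matching_start), ("end", first_end),
              ("n_start", PySem.List.pyGetD starts matching_start 0),
              ("n_end", PySem.List.pyGetD ends first_end 0)]

-- ===== PORT B =====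
-- forward scan: index of first token containing ')' (Source B's enumerate loop with break)
def altFindEnd (expression : List String) (i : Nat) : Option Nat :=
  match expression with
  | [] => none
  | tok :: rest => if 0 < PySem.Str.count tok ")" then some i else altFindEnd rest (i + 1)

-- backward scan: Source B's 'while j >= 0' countdown; expression[j] is always in range when the
-- scan is started at a valid index, so getD is exact there
def altScanBack (expression : List String) : Nat → Option Nat
  | 0 => if 0 < PySem.Str.count (expression.getD 0 "") "(" then some 0 else none
  | j + 1 => if 0 < PySem.Str.count (expression.getD (j + 1) "") "(" then some (j + 1)
             else altScanBack expression j

def get_inner_alt (expression : List String) : Option (List (String × Int)) :=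
  match altFindEnd expression 0 with
  | none => none
  | some first_end =>
    match altScanBack expression first_end with
    | none => none  -- Source B raises ValueError here; excluded by Pre_
    | some j =>
      some [("start", (j : Int)), ("end", (first_end : Int)),
            ("n_start", (PySem.Str.count (expression.getD j "") "(" : Int)),
            ("n_end", (PySem.Str.count (expression.getD first_end "") ")" : Int))]

-- ===== PRECONDITION & SPEC =====
-- Pre_ excludes exactly the inputs where some token contains ')' but no token at or before the
-- first such token contains '(': there Python A raises ValueError (max() of an empty sequence)
-- and Python B raises ValueError too.
def Pre_get_inner (expression : List String) : Prop :=
  (Option.all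
    (fun fe => (expression.take (fe + 1)).any (fun s => decide (0 < PySem.Str.count s "(")))
    (expression.findIdx? (fun s => decide (0 < PySem.Str.count s ")")))) = true
instance (expression : List String) : Decidable (Pre_get_inner expression) := by
  unfold Pre_get_inner; infer_instance

def pvWitness_get_inner : List String := ["(", "2", "+", "3", ")"]

def Spec_get_inner (expression : List String) (out : Option (List (String × Int))) : Prop := out = get_inner_alt expression
instance (expression : List String) (out : Option (List (String × Int))) : Decidable (Spec_get_inner expression out) := by unfold Spec_get_inner; infer_instance

-- ===== CLAIM (what is proved, stated in full; the proofs are below) =====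
def Claim_equal_get_inner : Prop := ∀ (expression : List String), Dom_get_inner expression → Pre_get_inner expression → Spec_get_inner expression (get_inner expression)

-- ===== LEMMAS AND PROOFS =====

theorem pv_foldl_append_eq_map (e : List String) (f : String → Int) :
    e.foldl (fun acc c => acc ++ [f c]) [] = e.map f := by
  simpa using PySem.List.foldl_append_singleton_eq_map f e []

-- altFindEnd with offset i is findIdx? shifted by i
theorem pv_altFindEnd_eq_findIdx (e : List String) (i : Nat) :
    altFindEnd e i = (e.findIdx? (fun s => decide (0 < PySem.Str.count s ")"))).map (fun n => i + n) := by
  induction e generalizing i with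
  | nil => simp [altFindEnd]
  | cons tok rest ih =>
    rw [List.findIdx?_cons]
    show (if 0 < PySem.Str.count tok ")" then some i else altFindEnd rest (i + 1)) = _
    by_cases h : 0 < PySem.Str.count tok ")"
    · rw [if_pos h, if_pos (by simpa using h)]
      rfl
    · rw [if_neg h, if_neg (by simpa using h), ih (i + 1)]
      cases List.findIdx? (fun s => decide (0 < PySem.Str.count s ")")) rest with
      | none => rfl
      | some n => simp only [Option.map_some]; congr 1; omega

-- membership in the A-side index comprehension (enumerate + filter + project)
theorem pv_mem_enum_filter (l : List Int) (k : Int) (c : Int × Int → Bool) (x : Int) :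
    (x ∈ ((PySem.List.enumerate l k).filter c).map (·.1))
    ↔ ∃ j : Nat, j < l.length ∧ x = k + (j : Int) ∧ c (x, l.getD j 0) = true := by
  induction l generalizing k with
  | nil => simp [PySem.List.enumerate]
  | cons a t ih =>
    rw [PySem.List.enumerate_cons, List.filter_cons]
    by_cases hc : c (k, a) = true
    · rw [if_pos hc]
      simp only [List.map_cons, List.mem_cons]
      constructor
      · rintro (rfl | hx)
        · exact ⟨0, by simp, by simp, by simpa using hc⟩
        · rcases (ih (k + 1)).mp hx with ⟨j, hj, rfl, hcj⟩
          exact ⟨j + 1, by simpa using hj, by push_cast; ring, by simpa using hcj⟩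
      · rintro ⟨j, hj, rfl, hcj⟩
        cases j with
        | zero => left; simp
        | succ j =>
          right
          refine (ih (k + 1)).mpr ⟨j, by simpa using hj, by push_cast; ring, ?_⟩
          have h2 : k + (↑(j + 1) : Int) = k + 1 + j := by push_cast; ring
          rw [h2] at hcj
          convert hcj using 2; (try simp); omega
    · rw [if_neg hc]
      rw [ih (k + 1)]
      constructor
      · rintro ⟨j, hj, rfl, hcj⟩
        exact ⟨j + 1, by simpa using hj, by push_cast; ring, by
          have : k + 1 + (j : Int) = k + (↑(j + 1) : Int) := by push_cast; ring
          rw [this] at hcj; convert hcj using 2; (try simp); omega⟩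
      · rintro ⟨j, hj, rfl, hcj⟩
        cases j with
        | zero => exact absurd (by simpa using hcj) (by simpa using hc)
        | succ j =>
          refine ⟨j, by simpa using hj, by push_cast; ring, ?_⟩
          have h2 : k + (↑(j + 1) : Int) = k + 1 + j := by push_cast; ring
          rw [h2] at hcj
          convert hcj using 2; (try simp); omega

theorem pv_sum_cast (e : List String) (g : String → Nat) :
    (e.map (fun s => ((g s : Nat) : Int))).sum = (((e.map g).sum : Nat) : Int) := by
  induction e with
  | nil => rfl
  | cons a t ih => simp [ih]

theorem pv_scanBack_sound (e : List String) (j r : Nat) (h : altScanBack e j = some r) :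
    r ≤ j ∧ 0 < PySem.Str.count (e.getD r "") "(" := by
  induction j with
  | zero =>
    unfold altScanBack at h
    by_cases hq : 0 < PySem.Str.count (e.getD 0 "") "("
    · rw [if_pos hq] at h; cases h; exact ⟨le_refl _, hq⟩
    · rw [if_neg hq] at h; cases h
  | succ j ih =>
    unfold altScanBack at h
    by_cases hq : 0 < PySem.Str.count (e.getD (j + 1) "") "("
    · rw [if_pos hq] at h; cases h; exact ⟨le_refl _, hq⟩
    · rw [if_neg hq] at h
      rcases ih h with ⟨h1, h2⟩
      exact ⟨Nat.le_succ_of_le h1, h2⟩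

theorem pv_scanBack_max (e : List String) (j r : Nat) (h : altScanBack e j = some r)
    (t : Nat) (ht : t ≤ j) (hq : 0 < PySem.Str.count (e.getD t "") "(") : t ≤ r := by
  induction j with
  | zero =>
    interval_cases t
    exact Nat.zero_le _
  | succ j ih =>
    unfold altScanBack at h
    by_cases hq1 : 0 < PySem.Str.count (e.getD (j + 1) "") "("
    · rw [if_pos hq1] at h; cases h; exact ht
    · rw [if_neg hq1] at h
      have ht' : t ≤ j := by
        rcases Nat.lt_or_ge t (j + 1) with h1 | h1
        · omega
        · exfalso; have : t = j + 1 := by omega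
          exact hq1 (this ▸ hq)
      exact ih h ht'

theorem pv_scanBack_none (e : List String) (j : Nat) (h : altScanBack e j = none)
    (t : Nat) (ht : t ≤ j) : ¬ 0 < PySem.Str.count (e.getD t "") "(" := by
  induction j with
  | zero =>
    interval_cases t
    unfold altScanBack at h
    by_cases hq : 0 < PySem.Str.count (e.getD 0 "") "("
    · rw [if_pos hq] at h; cases h
    · exact hq
  | succ j ih =>
    unfold altScanBack at h
    by_cases hq : 0 < PySem.Str.count (e.getD (j + 1) "") "("
    · rw [if_pos hq] at h; cases h
    · rw [if_neg hq] at h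
      rcases Nat.lt_or_ge t (j + 1) with h1 | h1
      · exact ih h (by omega)
      · have : t = j + 1 := by omega
        exact this ▸ hq

-- ===== VERDICT (by name: the statement is the Claim_ definition above) =====
theorem pv_getD_map (e : List String) (f : String → Int) (n : Nat) (h : n < e.length) (d : Int) :
    (e.map f).getD n d = f (e.getD n "") := by
  rw [List.getD_eq_getElem _ _ (by simpa using h), List.getElem_map,
      List.getD_eq_getElem _ _ h]

theorem get_inner_spec : Claim_equal_get_inner := by
  intro e _hdom hpre
  unfold Spec_get_inner get_inner get_inner_alt
  rw [pv_foldl_append_eq_map, pv_foldl_append_eq_map]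
  have hf := pv_altFindEnd_eq_findIdx e 0
  cases h0 : altFindEnd e 0 with
  | none =>
    rw [h0] at hf
    have hn : e.findIdx? (fun s => decide (0 < PySem.Str.count s ")")) = none := by
      cases hx : e.findIdx? (fun s => decide (0 < PySem.Str.count s ")")) with
      | none => rfl
      | some n => rw [hx] at hf; simp at hf
    have hsum : (e.map (fun s => (PySem.Str.count s ")" : Int))).sum = 0 := by
      rw [pv_sum_cast]
      norm_cast
      rw [List.sum_eq_zero_iff_forall_eq_nat]
      intro x hx
      rcases List.mem_map.mp hx with ⟨s, hs, rfl⟩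
      have := List.findIdx?_eq_none_iff.mp hn s hs
      simpa using this
    rw [if_pos hsum]
  | some fe =>
    rw [h0] at hf
    have hidx : e.findIdx? (fun s => decide (0 < PySem.Str.count s ")")) = some fe := by
      cases hx : e.findIdx? (fun s => decide (0 < PySem.Str.count s ")")) with
      | none => rw [hx] at hf; simp at hf
      | some n => rw [hx] at hf; simp at hf; rw [hf]
    rcases List.findIdx?_eq_some_iff_getElem.mp hidx with ⟨hfe_lt, hpe, hmin⟩
    have hpe' : 0 < PySem.Str.count (e.getD fe "") ")" := by
      rw [List.getD_eq_getElem _ _ hfe_lt]; simpa using hpe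
    have hmin' : ∀ t : Nat, t < fe → ¬ 0 < PySem.Str.count (e.getD t "") ")" := by
      intro t ht
      have := hmin t ht
      rw [List.getD_eq_getElem _ _ (lt_trans ht hfe_lt)]
      simpa using this
    -- Pre_ gives an open paren at or before fe
    obtain ⟨t0, ht0le, ht0q⟩ : ∃ t, t ≤ fe ∧ 0 < PySem.Str.count (e.getD t "") "(" := by
      unfold Pre_get_inner at hpre
      rw [hidx] at hpre
      simp only [Option.all_some, List.any_eq_true] at hpre
      rcases hpre with ⟨s, hs, hq⟩
      rcases List.mem_iff_getElem.mp hs with ⟨t, htlt, rfl⟩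
      have h2 : t < fe + 1 ∧ t < e.length := by
        simp only [List.length_take, lt_min_iff] at htlt
        exact htlt
      refine ⟨t, by omega, ?_⟩
      rw [List.getD_eq_getElem _ _ h2.2]
      rw [List.getElem_take] at hq
      simpa using hq
    cases hsb : altScanBack e fe with
    | none => exact absurd ht0q (pv_scanBack_none e fe hsb t0 ht0le)
    | some j =>
      obtain ⟨hjle, hjq⟩ := pv_scanBack_sound e fe j hsb
      have hjlt : j < e.length := lt_of_le_of_lt hjle hfe_lt
      have hsum : ¬ (e.map (fun s => (PySem.Str.count s ")" : Int))).sum = 0 := by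
        rw [pv_sum_cast]
        norm_cast
        rw [List.sum_eq_zero_iff_forall_eq_nat]
        intro hall
        have : PySem.Str.count (e.getD fe "") ")" = 0 := by
          have := hall (PySem.Str.count (e[fe] : String) ")")
            (List.mem_map.mpr ⟨e[fe], List.getElem_mem hfe_lt, rfl⟩)
          rw [List.getD_eq_getElem _ _ hfe_lt]; exact this
        omega
      rw [if_neg hsum]
      -- the min? comprehension evaluates to fe
      have hget_end : ∀ n : Nat, n < e.length →
          (e.map (fun s => (PySem.Str.count s ")" : Int))).getD n 0 = (PySem.Str.count (e.getD n "") ")" : Int) :=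
        fun n hn => pv_getD_map e _ n hn 0
      have hfe_mem : (fe : Int) ∈
          (((PySem.List.enumerate (e.map (fun s => (PySem.Str.count s ")" : Int))) 0).filter
            (fun p => decide (0 < p.2))).map (·.1)) := by
        refine (pv_mem_enum_filter _ 0 _ _).mpr ⟨fe, by simpa using hfe_lt, by simp, ?_⟩
        rw [hget_end fe hfe_lt]
        simpa using hpe'
      have hmin_eq : PySem.List.min?
          (((PySem.List.enumerate (e.map (fun s => (PySem.Str.count s ")" : Int))) 0).filter
            (fun p => decide (0 < p.2))).map (·.1)) (fun i => i) = some (fe : Int) := by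
        cases hm : PySem.List.min?
            (((PySem.List.enumerate (e.map (fun s => (PySem.Str.count s ")" : Int))) 0).filter
              (fun p => decide (0 < p.2))).map (·.1)) (fun i => i) with
        | none =>
          rw [PySem.List.min?_eq_none_iff] at hm
          rw [hm] at hfe_mem
          simp at hfe_mem
        | some m =>
          congr 1
          have hm_mem := PySem.List.min?_mem hm
          obtain ⟨jm, hjm_lt, hmeq, hcjm⟩ := (pv_mem_enum_filter _ 0 _ _).mp hm_mem
          rw [List.length_map] at hjm_lt
          have hle := PySem.List.min?_isMin hm (fe : Int) hfe_mem
          have hq_jm : 0 < PySem.Str.count (e.getD jm "") ")" := by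
            rw [hget_end jm hjm_lt] at hcjm
            subst hmeq
            simpa using hcjm
          have hfe_le : fe ≤ jm := by
            by_contra hlt
            exact hmin' jm (by omega) hq_jm
          omega
      rw [hmin_eq]
      dsimp only
      -- the max? comprehension evaluates to j
      have hget_start : ∀ n : Nat, n < e.length →
          (e.map (fun s => (PySem.Str.count s "(" : Int))).getD n 0 = (PySem.Str.count (e.getD n "") "(" : Int) :=
        fun n hn => pv_getD_map e _ n hn 0
      have hj_mem : (j : Int) ∈
          (((PySem.List.enumerate (e.map (fun s => (PySem.Str.count s "(" : Int))) 0).filter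
            (fun p => decide (0 < p.2) && decide (p.1 ≤ (fe : Int)))).map (·.1)) := by
        refine (pv_mem_enum_filter _ 0 _ _).mpr ⟨j, by simpa using hjlt, by simp, ?_⟩
        rw [hget_start j hjlt]
        simp only [Bool.and_eq_true, decide_eq_true_eq]
        exact ⟨by simpa using hjq, by exact_mod_cast hjle⟩
      have hmax_eq : PySem.List.max?
          (((PySem.List.enumerate (e.map (fun s => (PySem.Str.count s "(" : Int))) 0).filter
            (fun p => decide (0 < p.2) && decide (p.1 ≤ (fe : Int)))).map (·.1)) (fun i => i) = some (j : Int) := by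
        cases hM : PySem.List.max?
            (((PySem.List.enumerate (e.map (fun s => (PySem.Str.count s "(" : Int))) 0).filter
              (fun p => decide (0 < p.2) && decide (p.1 ≤ (fe : Int)))).map (·.1)) (fun i => i) with
        | none =>
          rw [PySem.List.max?_eq_none_iff] at hM
          rw [hM] at hj_mem
          simp at hj_mem
        | some M =>
          congr 1
          have hM_mem := PySem.List.max?_mem hM
          obtain ⟨jM, hjM_lt, hMeq, hcjM⟩ := (pv_mem_enum_filter _ 0 _ _).mp hM_mem
          rw [List.length_map] at hjM_lt
          have hge := PySem.List.max?_isMax hM (j : Int) hj_mem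
          rw [hget_start jM hjM_lt] at hcjM
          simp only [Bool.and_eq_true, decide_eq_true_eq] at hcjM
          have hq_jM : 0 < PySem.Str.count (e.getD jM "") "(" := by
            have := hcjM.1
            subst hMeq
            simpa using this
          have hjM_le_fe : jM ≤ fe := by
            have := hcjM.2
            subst hMeq
            simp at this
            exact_mod_cast this
          have := pv_scanBack_max e fe j hsb jM hjM_le_fe hq_jM
          omega
      rw [hmax_eq]
      dsimp only
      rw [PySem.List.pyGetD_natCast, PySem.List.pyGetD_natCast,
          hget_start j hjlt, hget_end fe hfe_lt, hsb]
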